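-- pv_equiv track=rewrite | github.com/mesudip/certapi | src/certapi/domain_batching.py | would_trigger
-- ===== SOURCE A (Python) =====
-- def would_trigger(labels: list[str], blocked: set[str]) -> bool:
--     """
--     Boulder-style recursive on-demand trigger check used by tests.
--     """
--     if len(labels) < 4:
--         return False
--
--     blocked = {label.lower() for label in blocked}
--
--     consecutive_blocked = 0
--     prev_label: str | None = None
--     for label in labels:
--         label = label.lower()
--         is_blocked = label in blocked
--         if is_blocked:
--             consecutive_blocked += 1
--             if prev_label is not None and prev_label == label:
--                 return True
--             if consecutive_blocked >= 3:
--                 return True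
--         else:
--             consecutive_blocked = 0
--         prev_label = label
--     return False
-- ===== SOURCE B (Python) =====
-- def would_trigger(labels: list[str], blocked: set[str]) -> bool:
--     """
--     Boulder-style recursive on-demand trigger check, evaluated as two
--     independent passes over precomputed lowercased labels and a blocked-mask.
--     """
--     if len(labels) < 4:
--         return False
--
--     blocked_lower = {b.lower() for b in blocked}
--     low = [l.lower() for l in labels]
--     mask = [l in blocked_lower for l in low]
--
--     # Pass 1: an adjacent pair of equal labels whose (second) label is blocked.
--     dup = any(m and a == b for a, b, m in zip(low, low[1:], mask[1:]))
--     # Pass 2: three consecutive blocked positions anywhere.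
--     triple = any(mask[i] and mask[i + 1] and mask[i + 2] for i in range(len(mask) - 2))
--     return dup or triple
-- ===== Notes on version B (the rewrite author's own statement) =====
-- stated objective: alternative
-- what changed: Replaced A's single stateful scan with early returns (consecutive counter + previous label) by two independent passes over a precomputed lowercased list and blocked-mask: an adjacent-equal-blocked-pair zip pass and a sliding 3-window pass over the mask, OR-ed together.
import Mathlib
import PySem

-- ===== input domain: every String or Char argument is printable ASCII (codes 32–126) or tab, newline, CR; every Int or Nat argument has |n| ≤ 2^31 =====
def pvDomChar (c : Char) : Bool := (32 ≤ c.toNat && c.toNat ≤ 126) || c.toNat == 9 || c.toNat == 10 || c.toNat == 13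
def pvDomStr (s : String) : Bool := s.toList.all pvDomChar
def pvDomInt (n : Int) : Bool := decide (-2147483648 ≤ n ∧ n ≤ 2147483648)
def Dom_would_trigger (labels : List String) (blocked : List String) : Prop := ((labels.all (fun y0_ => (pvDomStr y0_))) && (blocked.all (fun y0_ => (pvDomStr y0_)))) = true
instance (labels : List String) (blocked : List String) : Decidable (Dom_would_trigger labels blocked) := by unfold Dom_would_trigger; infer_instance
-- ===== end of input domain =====

-- B replaces A's single early-return state machine by two independent passes
-- (adjacent-duplicate-blocked pair, and a 3-window of blocked positions) over a
-- precomputed lowercased list and blocked-mask; objective: alternative decomposition.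


-- ===== PORT A =====
-- A's for-loop with state (consecutive_blocked, prev_label) and early returns.
def wtLoopA (bl : PySem.Set String) : List String → Int → Option String → Bool
  | [], _, _ => false
  | l :: rest, consecutive, prev =>
    let label := PySem.Str.lower l
    let isBlocked := PySem.Set.contains bl label
    if isBlocked then
      let consecutive := consecutive + 1
      if (match prev with | some p => p == label | none => false) then
        true
      else if consecutive ≥ 3 then
        true
      else
        wtLoopA bl rest consecutive (some label)
    else
      wtLoopA bl rest 0 (some label)

def would_trigger (labels : List String) (blocked : List String) : Bool :=
  if (labels.length : Int) < 4 then false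
  else
    let bl : PySem.Set String := PySem.Set.ofList (blocked.map PySem.Str.lower)
    wtLoopA bl labels 0 none

-- ===== PORT B =====
-- any(m and a == b for a, b, m in zip(low, low[1:], mask[1:]))
def wtDup : List String → List String → List Bool → Bool
  | a :: as_, b :: bs, m :: ms => (m && a == b) || wtDup as_ bs ms
  | _, _, _ => false

-- any(mask[i] and mask[i+1] and mask[i+2] for i in range(len(mask)-2)) — sliding 3-window
def wtTriple : List Bool → Bool
  | a :: b :: c :: rest => (a && b && c) || wtTriple (b :: c :: rest)
  | _ => false

def would_trigger_alt (labels : List String) (blocked : List String) : Bool :=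
  if (labels.length : Int) < 4 then false
  else
    let bl : PySem.Set String := PySem.Set.ofList (blocked.map PySem.Str.lower)
    let low := labels.map PySem.Str.lower
    let mask := low.map (fun l => PySem.Set.contains bl l)
    wtDup low low.tail mask.tail || wtTriple mask

-- ===== PRECONDITION & SPEC =====
def Spec_would_trigger (labels : List String) (blocked : List String) (out : Bool) : Prop := out = would_trigger_alt labels blocked
instance (labels : List String) (blocked : List String) (out : Bool) : Decidable (Spec_would_trigger labels blocked out) := by unfold Spec_would_trigger; infer_instance

-- ===== CLAIM (what is proved, stated in full; the proofs are below) =====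
def Claim_equal_would_trigger : Prop := ∀ (labels : List String) (blocked : List String), Dom_would_trigger labels blocked → Spec_would_trigger labels blocked (would_trigger labels blocked)

-- ===== LEMMAS AND PROOFS =====

-- proof-side bridges: the "duplicate pair" part of A's scan, threaded with the previous label
def dupP (bl : PySem.Set String) : Option String → List String → Bool
  | _, [] => false
  | prev, l :: ls =>
    let label := PySem.Str.lower l
    (PySem.Set.contains bl label &&
      (match prev with | some p => p == label | none => false)) || dupP bl (some label) ls

-- the "≥3 consecutive blocked" part of A's scan, over the mask, with the running count
def tripC : Int → List Bool → Bool
  | _, [] => false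
  | c, m :: ms => if m then ((c + 1 ≥ 3 : Bool) || tripC (c + 1) ms) else tripC 0 ms

theorem wtTriple_false_cons (ms : List Bool) : wtTriple (false :: ms) = wtTriple ms := by
  match ms with
  | [] => rfl
  | [m] => rfl
  | a :: b :: rest => simp [wtTriple]

theorem tripC_eq (ms : List Bool) :
    tripC 0 ms = wtTriple ms ∧ tripC 1 ms = wtTriple (true :: ms) ∧
    tripC 2 ms = wtTriple (true :: true :: ms) := by
  induction ms with
  | nil => refine ⟨rfl, rfl, rfl⟩
  | cons m ms ih =>
    obtain ⟨ih0, ih1, ih2⟩ := ih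
    cases m with
    | true =>
      refine ⟨by simp [tripC, ih1], by simp [tripC, ih2], by simp [tripC, wtTriple]⟩
    | false =>
      have h1 : tripC 0 ms = wtTriple (true :: false :: ms) := by
        match ms with
        | [] => rfl
        | c :: rest =>
          simp only [wtTriple, Bool.and_false, Bool.false_and, Bool.false_or]
          rw [wtTriple_false_cons]
          exact ih0
      refine ⟨?_, ?_, ?_⟩
      · simp only [tripC, Bool.false_eq_true, if_false]
        rw [wtTriple_false_cons]; exact ih0
      · simpa [tripC] using h1
      · simp only [tripC, Bool.false_eq_true, if_false, wtTriple, Bool.and_false,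
          Bool.false_or]
        exact h1

theorem loopA_eq (bl : PySem.Set String) (ls : List String) :
    ∀ (c : Int) (prev : Option String),
      wtLoopA bl ls c prev =
        (dupP bl prev ls ||
          tripC c (ls.map (fun l => PySem.Set.contains bl (PySem.Str.lower l)))) := by
  induction ls with
  | nil => intro c prev; rfl
  | cons l ls ih =>
    intro c prev
    simp only [wtLoopA, dupP, tripC, List.map_cons]
    by_cases hb : PySem.Str.lower l ∈ bl
    · by_cases hp : (match prev with | some p => p == PySem.Str.lower l | none => false) = true
      · simp [hb, hp]
      · by_cases h3 : (3 : Int) ≤ c + 1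
        · simp [hb, hp, h3]
        · simp [hb, hp, h3, ih]
    · simp [hb, ih]

theorem dupP_eq (bl : PySem.Set String) (ls : List String) :
    ∀ (p : String),
      dupP bl (some p) ls =
        wtDup (p :: ls.map PySem.Str.lower) (ls.map PySem.Str.lower)
          ((ls.map PySem.Str.lower).map (fun l => PySem.Set.contains bl l)) := by
  induction ls with
  | nil => intro p; rfl
  | cons l ls ih =>
    intro p
    simp [dupP, wtDup, ih]

-- ===== VERDICT (by name: the statement is the Claim_ definition above) =====
theorem would_trigger_spec : Claim_equal_would_trigger := by
  intro labels blocked _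
  unfold Spec_would_trigger would_trigger would_trigger_alt
  by_cases hlen : (labels.length : Int) < 4
  · simp [hlen]
  · simp only [hlen, if_false]
    set bl : PySem.Set String := PySem.Set.ofList (blocked.map PySem.Str.lower) with hbl
    rw [loopA_eq]
    match labels with
    | [] => rfl
    | l :: ls =>
      simp only [List.map_cons, List.tail_cons, dupP]
      rw [dupP_eq, (tripC_eq _).1]
      simp [Function.comp_def]
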